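-- pv_equiv track=rewrite | github.com/Septher/cr_SGM | data/label_parser.py | get_hdisk_id
-- ===== SOURCE A (Python) =====
-- SSD_quantile = [16, 32, 128, 256, 512]
--
-- HDD_quantile = [256, 512, 1024]
--
-- def get_hdisk_id(size, tp):
--     if tp == "SSD": #[0, 5]
--         for id, quantile in enumerate(SSD_quantile):
--             if size <= quantile:
--                 return id
--         return 5
--     else: #[6, 9]
--         for id, quantile in enumerate(HDD_quantile, 6):
--             if size <= quantile:
--                 return id
--         return 9
-- ===== SOURCE B (Python) =====
-- import bisect
--
-- SSD_quantile = [16, 32, 128, 256, 512]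
-- HDD_quantile = [256, 512, 1024]
--
-- def get_hdisk_id(size, tp):
--     if tp == "SSD":
--         return bisect.bisect_left(SSD_quantile, size)
--     return 6 + bisect.bisect_left(HDD_quantile, size)
-- ===== Notes on version B (the rewrite author's own statement) =====
-- stated objective: idiomatic
-- what changed: Replaces the explicit enumerate loops with branchless binary searches (bisect.bisect_left) on the sorted quantile tables; the fallbacks 5 and 9 fall out as the table lengths.
import Mathlib
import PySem

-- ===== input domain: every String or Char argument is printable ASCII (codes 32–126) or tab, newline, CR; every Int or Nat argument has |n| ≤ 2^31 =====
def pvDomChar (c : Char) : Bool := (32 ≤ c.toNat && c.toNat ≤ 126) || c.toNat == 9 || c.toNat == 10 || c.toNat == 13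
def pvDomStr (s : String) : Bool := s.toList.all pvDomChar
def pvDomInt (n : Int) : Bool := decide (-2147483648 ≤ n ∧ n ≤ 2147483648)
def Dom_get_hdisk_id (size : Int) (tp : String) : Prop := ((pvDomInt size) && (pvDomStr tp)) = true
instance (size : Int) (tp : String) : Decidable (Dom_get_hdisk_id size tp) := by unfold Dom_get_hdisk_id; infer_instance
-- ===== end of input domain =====

-- B replaces A's linear enumerate-scans with binary searches (bisect_left) on the sorted quantile tables (idiomatic).


-- ===== PORT A =====
def SSD_quantile : List Int := [16, 32, 128, 256, 512]
def HDD_quantile : List Int := [256, 512, 1024]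

-- the 'for id, quantile in enumerate(qs, start): if size <= quantile: return id' loop with fallback
def pvLoopA (size : Int) (id : Int) (qs : List Int) (fallback : Int) : Int :=
  match qs with
  | [] => fallback
  | q :: rest => if size ≤ q then id else pvLoopA size (id + 1) rest fallback

def get_hdisk_id (size : Int) (tp : String) : Int :=
  if tp = "SSD" then pvLoopA size 0 SSD_quantile 5
  else pvLoopA size 6 HDD_quantile 9

-- ===== PORT B =====
-- bisect.bisect_left: binary search for the leftmost insertion point of x in a[lo:hi]
def bisectLeft (a : List Int) (x : Int) (lo hi : Nat) : Nat :=
  if _h : lo < hi then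
    if a.getD ((lo + hi) / 2) 0 < x then bisectLeft a x ((lo + hi) / 2 + 1) hi
    else bisectLeft a x lo ((lo + hi) / 2)
  else lo
termination_by hi - lo
decreasing_by all_goals omega

def get_hdisk_id_alt (size : Int) (tp : String) : Int :=
  if tp = "SSD" then (bisectLeft SSD_quantile size 0 5 : Int)
  else 6 + (bisectLeft HDD_quantile size 0 3 : Int)

-- ===== PRECONDITION & SPEC =====
def Spec_get_hdisk_id (size : Int) (tp : String) (out : Int) : Prop := out = get_hdisk_id_alt size tp
instance (size : Int) (tp : String) (out : Int) : Decidable (Spec_get_hdisk_id size tp out) := by unfold Spec_get_hdisk_id; infer_instance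

-- ===== CLAIM (what is proved, stated in full; the proofs are below) =====
def Claim_equal_get_hdisk_id : Prop := ∀ (size : Int) (tp : String), Dom_get_hdisk_id size tp → Spec_get_hdisk_id size tp (get_hdisk_id size tp)

-- ===== LEMMAS AND PROOFS =====
theorem bl_step_true {a : List Int} {x : Int} {lo hi : Nat} (h : lo < hi)
    (hc : a.getD ((lo + hi) / 2) 0 < x) :
    bisectLeft a x lo hi = bisectLeft a x ((lo + hi) / 2 + 1) hi := by
  rw [bisectLeft, dif_pos h, if_pos hc]

theorem bl_step_false {a : List Int} {x : Int} {lo hi : Nat} (h : lo < hi)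
    (hc : ¬ a.getD ((lo + hi) / 2) 0 < x) :
    bisectLeft a x lo hi = bisectLeft a x lo ((lo + hi) / 2) := by
  rw [bisectLeft, dif_pos h, if_neg hc]

theorem bl_done {a : List Int} {x : Int} {lo hi : Nat} (h : ¬ lo < hi) :
    bisectLeft a x lo hi = lo := by
  rw [bisectLeft, dif_neg h]

theorem ssd_eq (size : Int) : pvLoopA size 0 SSD_quantile 5 = (bisectLeft SSD_quantile size 0 5 : Int) := by
  simp only [SSD_quantile, pvLoopA]
  split_ifs with h1 h2 h3 h4 h5
  · rw [bl_step_false (by norm_num) (by simp; omega),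
        bl_step_false (by norm_num) (by simp; omega),
        bl_step_false (by norm_num) (by simp; omega),
        bl_done (by norm_num)]
    norm_num
  · rw [bl_step_false (by norm_num) (by simp; omega),
        bl_step_false (by norm_num) (by simp; omega),
        bl_step_true (by norm_num) (by simp; omega),
        bl_done (by norm_num)]
    norm_num
  · rw [bl_step_false (by norm_num) (by simp; omega),
        bl_step_true (by norm_num) (by simp; omega),
        bl_done (by norm_num)]
    norm_num
  · rw [bl_step_true (by norm_num) (by simp; omega),
        bl_step_false (by norm_num) (by simp; omega),
        bl_step_false (by norm_num) (by simp; omega),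
        bl_done (by norm_num)]
    norm_num
  · rw [bl_step_true (by norm_num) (by simp; omega),
        bl_step_false (by norm_num) (by simp; omega),
        bl_step_true (by norm_num) (by simp; omega),
        bl_done (by norm_num)]
    norm_num
  · rw [bl_step_true (by norm_num) (by simp; omega),
        bl_step_true (by norm_num) (by simp; omega),
        bl_done (by norm_num)]
    norm_num

theorem hdd_eq (size : Int) : pvLoopA size 6 HDD_quantile 9 = 6 + (bisectLeft HDD_quantile size 0 3 : Int) := by
  simp only [HDD_quantile, pvLoopA]
  split_ifs with h1 h2 h3
  · rw [bl_step_false (by norm_num) (by simp; omega),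
        bl_step_false (by norm_num) (by simp; omega),
        bl_done (by norm_num)]
    norm_num
  · rw [bl_step_false (by norm_num) (by simp; omega),
        bl_step_true (by norm_num) (by simp; omega),
        bl_done (by norm_num)]
    norm_num
  · rw [bl_step_true (by norm_num) (by simp; omega),
        bl_step_false (by norm_num) (by simp; omega),
        bl_done (by norm_num)]
    norm_num
  · rw [bl_step_true (by norm_num) (by simp; omega),
        bl_step_true (by norm_num) (by simp; omega),
        bl_done (by norm_num)]
    norm_num

-- ===== VERDICT (by name: the statement is the Claim_ definition above) =====
theorem get_hdisk_id_spec : Claim_equal_get_hdisk_id := by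
  intro size tp _
  unfold Spec_get_hdisk_id get_hdisk_id get_hdisk_id_alt
  split_ifs
  · exact ssd_eq size
  · exact hdd_eq size
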